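-- pv_equiv track=rewrite | github.com/abhi-gowdaa/leetcode | 2239-find-closest-number-to-zero/2239-find-closest-number-to-zero.py | findClosestNumber
-- ===== SOURCE A (Python) =====
-- from typing import List
--
-- def findClosestNumber(nums: List[int]) -> int:
--     closest=nums[0]
--     for i,num in enumerate(nums):
--         if abs(num) < abs(closest):
--             closest=num
--     if closest < 0 and abs(closest) in nums:
--         return abs(closest)
--     else:
--          return closest
-- ===== SOURCE B (Python) =====
-- def findClosestNumber(nums):
--     return sorted(nums, key=lambda x: (abs(x), -x))[0]
-- ===== Notes on version B (the rewrite author's own statement) =====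
-- stated objective: simpler
-- what changed: Replaces A's scan-for-min-abs plus positive-fixup membership test by a one-line sort on the key (abs(x), -x) and taking the first element.
import Mathlib
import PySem

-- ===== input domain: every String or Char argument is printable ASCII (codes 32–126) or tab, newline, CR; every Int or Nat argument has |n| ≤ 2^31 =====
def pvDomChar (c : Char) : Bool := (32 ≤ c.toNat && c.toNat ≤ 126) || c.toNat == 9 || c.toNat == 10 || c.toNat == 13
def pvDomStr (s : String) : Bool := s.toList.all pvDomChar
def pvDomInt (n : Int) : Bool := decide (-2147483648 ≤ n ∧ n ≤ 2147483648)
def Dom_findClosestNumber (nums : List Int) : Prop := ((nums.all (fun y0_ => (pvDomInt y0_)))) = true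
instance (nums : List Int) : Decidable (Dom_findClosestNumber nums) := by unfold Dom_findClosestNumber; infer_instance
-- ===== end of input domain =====

-- B replaces A's scan-for-min-abs plus positive-fixup membership test by sorting on the key
-- (abs(x), -x) and taking the first element (objective: simpler).


-- ===== PORT A =====
def findClosestNumber (nums : List Int) : Int :=
  -- closest = nums[0]  (IndexError on [], excluded by Pre_; .getD 0 is never taken there)
  let closest0 := (PySem.List.pyGet? nums 0).getD 0
  -- for i, num in enumerate(nums): if abs(num) < abs(closest): closest = num
  let closest := (PySem.List.enumerate nums).foldl
    (fun c p => if |p.2| < |c| then p.2 else c) closest0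
  -- if closest < 0 and abs(closest) in nums: return abs(closest) else: return closest
  if closest < 0 ∧ |closest| ∈ nums then |closest| else closest

-- ===== PORT B =====
def findClosestNumber_alt (nums : List Int) : Int :=
  -- sorted(nums, key=lambda x: (abs(x), -x))[0]  (IndexError on [], excluded by Pre_)
  (PySem.List.pyGet? (PySem.List.sorted2 nums (fun x => |x|) (fun x => -x)) 0).getD 0

-- ===== PRECONDITION & SPEC =====
-- Pre_ excludes only the empty list, on which both Pythons raise IndexError.
def Pre_findClosestNumber (nums : List Int) : Prop := nums ≠ []
instance (nums : List Int) : Decidable (Pre_findClosestNumber nums) := by unfold Pre_findClosestNumber; infer_instance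
def pvWitness_findClosestNumber : List Int := [-1, 2, 1]

def Spec_findClosestNumber (nums : List Int) (out : Int) : Prop := out = findClosestNumber_alt nums
instance (nums : List Int) (out : Int) : Decidable (Spec_findClosestNumber nums out) := by unfold Spec_findClosestNumber; infer_instance

-- ===== CLAIM (what is proved, stated in full; the proofs are below) =====
def Claim_equal_findClosestNumber : Prop := ∀ (nums : List Int), Dom_findClosestNumber nums → Pre_findClosestNumber nums → Spec_findClosestNumber nums (findClosestNumber nums)

-- ===== LEMMAS AND PROOFS =====

-- A's loop step, with the (unused) enumerate index dropped.
def pvFA (c y : Int) : Int := if |y| < |c| then y else c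

-- the comparison sorted2 uses for the key (|x|, -x)
def pvBlt (y c : Int) : Bool := decide (|y| < |c|) || (!decide (|c| < |y|) && decide (-y < -c))

-- B's effective loop step: how the head of the insertion sort evolves.
def pvFB (c y : Int) : Int := if pvBlt y c then y else c

theorem pvBlt_iff (a b : Int) : pvBlt a b = true ↔ (|a| < |b| ∨ (|a| = |b| ∧ b < a)) := by
  simp [pvBlt]
  omega

theorem pv_insertBy_cons (before : Int → Int → Bool) (x y : Int) (ys : List Int) :
    PySem.List.insertBy before x (y :: ys) =
      if before x y then x :: y :: ys else y :: PySem.List.insertBy before x ys := rfl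

theorem pv_foldl_insertBy_head (before : Int → Int → Bool) :
    ∀ (ts : List Int) (h : Int) (rest : List Int), ∃ rest',
      ts.foldl (fun acc x => PySem.List.insertBy before x acc) (h :: rest)
        = ts.foldl (fun c y => if before y c then y else c) h :: rest' := by
  intro ts
  induction ts with
  | nil => exact fun h rest => ⟨rest, rfl⟩
  | cons y ts ih =>
    intro h rest
    simp only [List.foldl_cons, pv_insertBy_cons]
    by_cases hb : before y h = true
    · simpa [hb] using ih y (h :: rest)
    · simpa [hb] using ih h (PySem.List.insertBy before y rest)

theorem pv_enum_fold : ∀ (l : List Int) (s c : Int),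
    (PySem.List.enumerate l s).foldl (fun c p => if |p.2| < |c| then p.2 else c) c
      = l.foldl pvFA c := by
  intro l
  induction l with
  | nil => intro s c; simp [PySem.List.enumerate_nil]
  | cons x l ih => intro s c; simp [PySem.List.enumerate_cons, pvFA, ih]

theorem pvFA_cases (x y : Int) : pvFA x y = y ∨ pvFA x y = x := by
  unfold pvFA; split <;> simp

theorem pvFA_abs_le (x y : Int) : |pvFA x y| ≤ |x| ∧ |pvFA x y| ≤ |y| := by
  unfold pvFA; split <;> constructor <;> omega

theorem pvFB_cases (x y : Int) : pvFB x y = y ∨ pvFB x y = x := by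
  unfold pvFB; split <;> simp

theorem pvFA_spec : ∀ (t : List Int) (x : Int),
    t.foldl pvFA x ∈ x :: t ∧ ∀ y ∈ x :: t, |t.foldl pvFA x| ≤ |y| := by
  intro t
  induction t with
  | nil => intro x; simp
  | cons y t ih =>
    intro x
    simp only [List.foldl_cons]
    obtain ⟨hmem, hmin⟩ := ih (pvFA x y)
    obtain ⟨hle1, hle2⟩ := pvFA_abs_le x y
    refine ⟨?_, ?_⟩
    · rw [List.mem_cons] at hmem ⊢
      rcases hmem with h | h
      · rw [h]; rcases pvFA_cases x y with hc | hc <;> simp [hc]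
      · simp [h]
    · intro z hz
      have hx : |t.foldl pvFA (pvFA x y)| ≤ |pvFA x y| := hmin _ (List.mem_cons_self ..)
      rw [List.mem_cons, List.mem_cons] at hz
      rcases hz with rfl | rfl | hz
      · exact le_trans hx hle1
      · exact le_trans hx hle2
      · exact hmin _ (List.mem_cons_of_mem _ hz)

theorem pvFB_spec : ∀ (t : List Int) (x : Int),
    t.foldl pvFB x ∈ x :: t ∧ ∀ y ∈ x :: t, pvBlt y (t.foldl pvFB x) = false := by
  intro t
  induction t with
  | nil =>
    intro x
    refine ⟨by simp, ?_⟩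
    intro y hy
    simp only [List.foldl_nil]
    rw [List.mem_cons] at hy
    rcases hy with rfl | hy
    · rw [← Bool.not_eq_true, pvBlt_iff]; omega
    · simp at hy
  | cons y t ih =>
    intro x
    simp only [List.foldl_cons]
    obtain ⟨hmem, hmin⟩ := ih (pvFB x y)
    have hstart := hmin _ (List.mem_cons_self ..)
    refine ⟨?_, ?_⟩
    · rw [List.mem_cons] at hmem ⊢
      rcases hmem with h | h
      · rw [h]; rcases pvFB_cases x y with hc | hc <;> simp [hc]
      · simp [h]
    · intro z hz
      rw [List.mem_cons, List.mem_cons] at hz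
      rcases hz with rfl | rfl | hz
      · -- z = x
        by_cases hb : pvBlt y z = true
        · have hs : pvFB z y = y := by unfold pvFB; simp [hb]
          rw [hs] at hstart ⊢
          rw [pvBlt_iff] at hb
          rw [← Bool.not_eq_true, pvBlt_iff] at hstart ⊢
          omega
        · have hs : pvFB z y = z := by unfold pvFB; simp [hb]
          rw [hs] at hstart ⊢
          exact hstart
      · -- z = y
        by_cases hb : pvBlt z x = true
        · have hs : pvFB x z = z := by unfold pvFB; simp [hb]
          rw [hs] at hstart ⊢
          exact hstart
        · have hs : pvFB x z = x := by unfold pvFB; simp [hb]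
          rw [hs] at hstart ⊢
          rw [pvBlt_iff] at hb
          rw [← Bool.not_eq_true, pvBlt_iff] at hstart ⊢
          omega
      · exact hmin _ (List.mem_cons_of_mem _ hz)

-- the two ports on a nonempty list, reduced to the two folds
theorem pvA_eq (x : Int) (t : List Int) :
    findClosestNumber (x :: t) =
      (if t.foldl pvFA x < 0 ∧ |t.foldl pvFA x| ∈ x :: t then |t.foldl pvFA x|
       else t.foldl pvFA x) := by
  unfold findClosestNumber
  simp only [PySem.List.pyGet?_zero_cons, Option.getD_some, pv_enum_fold,
    List.foldl_cons]
  have : pvFA x x = x := by unfold pvFA; simp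
  rw [this]

theorem pvB_eq (x : Int) (t : List Int) :
    findClosestNumber_alt (x :: t) = t.foldl pvFB x := by
  unfold findClosestNumber_alt
  have hs : PySem.List.sorted2 (x :: t) (fun x => |x|) (fun x => -x)
      = (x :: t).foldl (fun acc y =>
          PySem.List.insertBy (fun a b =>
            decide (|a| < |b|) || (!decide (|b| < |a|) && decide (-a < -b))) y acc) [] := rfl
  rw [hs]
  simp only [List.foldl_cons]
  have h0 : PySem.List.insertBy (fun a b =>
      decide (|a| < |b|) || (!decide (|b| < |a|) && decide (-a < -b))) x [] = [x] := rfl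
  rw [h0]
  obtain ⟨rest', hr⟩ := pv_foldl_insertBy_head
    (fun a b => decide (|a| < |b|) || (!decide (|b| < |a|) && decide (-a < -b))) t x []
  rw [hr]
  simp only [PySem.List.pyGet?_zero_cons, Option.getD_some]
  congr 1

-- ===== VERDICT (by name: the statement is the Claim_ definition above) =====
theorem findClosestNumber_spec : Claim_equal_findClosestNumber := by
  intro nums _ hpre
  unfold Spec_findClosestNumber
  match nums, hpre with
  | x :: t, _ =>
    rw [pvA_eq, pvB_eq]
    obtain ⟨hcm, hcmin⟩ := pvFA_spec t x
    obtain ⟨hbm, hbmin⟩ := pvFB_spec t x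
    obtain ⟨c, hC⟩ : ∃ c, t.foldl pvFA x = c := ⟨_, rfl⟩
    obtain ⟨b, hB⟩ : ∃ b, t.foldl pvFB x = b := ⟨_, rfl⟩
    rw [hC] at hcm hcmin ⊢
    rw [hB] at hbm hbmin ⊢
    have h1 : |c| ≤ |b| := hcmin _ hbm
    have h2 : pvBlt c b = false := hbmin _ hcm
    rw [← Bool.not_eq_true, pvBlt_iff] at h2
    have habs : |b| = |c| := by omega
    have hbc : b = c ∨ b = -c := abs_eq_abs.mp habs
    by_cases hcase : c < 0 ∧ |c| ∈ x :: t
    · rw [if_pos hcase]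
      obtain ⟨hneg, hmemc⟩ := hcase
      have h3 : pvBlt |c| b = false := hbmin _ hmemc
      rw [← Bool.not_eq_true, pvBlt_iff] at h3
      have habsabs : |(|c|)| = |c| := abs_abs c
      have habsneg : |c| = -c := abs_of_neg hneg
      rcases hbc with rfl | rfl <;> omega
    · rw [if_neg hcase]
      push Not at hcase
      rcases hbc with rfl | rfl
      · rfl
      · by_cases hneg : c < 0
        · have habsneg : |c| = -c := abs_of_neg hneg
          have hmem : |c| ∈ x :: t := by rw [habsneg]; exact hbm
          exact absurd hmem (hcase hneg)
        · have h4 : pvBlt c (-c) = false := hbmin _ hcm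
          rw [← Bool.not_eq_true, pvBlt_iff] at h4
          have e1 : |c| = c := abs_of_nonneg (by omega)
          have e2 : |(-c)| = |c| := abs_neg c
          omega
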